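-- pv_equiv track=rewrite | github.com/rouxru/advent-of-code-2025 | 2025/aoc/day_two/part_two.py | is_invalid_repetition
-- ===== SOURCE A (Python) =====
-- def is_invalid_repetition(str_num: str) -> bool:
--     length = len(str_num)
--     for block_size in range(1, length):
--         if length % block_size == 0:
--             repeat_count = length // block_size
--
--             if repeat_count >= 2:
--                 block = str_num[:block_size]
--                 if block * repeat_count == str_num:
--                     return True
--
--     return False
-- ===== SOURCE B (Python) =====
-- def is_invalid_repetition(str_num: str) -> bool:
--     # classic string-doubling trick: s is a nontrivial repetition of a block
--     # iff s occurs inside (s+s) with both ends chopped off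
--     return len(str_num) > 0 and str_num in (str_num + str_num)[1:-1]
-- ===== Notes on version B (the rewrite author's own statement) =====
-- stated objective: faster
-- what changed: Replaces A's loop over all block sizes (building and comparing a candidate repetition for every divisor of the length) with the classic string-doubling test: s is a nontrivial repetition iff s occurs inside (s+s)[1:-1], one substring search.
import Mathlib
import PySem

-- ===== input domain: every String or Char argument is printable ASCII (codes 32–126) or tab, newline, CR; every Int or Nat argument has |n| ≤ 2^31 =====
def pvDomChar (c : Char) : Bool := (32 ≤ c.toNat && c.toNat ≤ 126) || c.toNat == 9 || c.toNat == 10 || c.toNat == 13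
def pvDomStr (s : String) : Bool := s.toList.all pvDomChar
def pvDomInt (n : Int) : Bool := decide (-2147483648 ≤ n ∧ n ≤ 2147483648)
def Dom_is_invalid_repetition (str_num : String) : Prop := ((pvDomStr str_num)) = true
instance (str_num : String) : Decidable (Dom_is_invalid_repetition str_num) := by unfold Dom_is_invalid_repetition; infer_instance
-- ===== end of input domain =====

-- B replaces A's divisor loop by the classic string-doubling test (s occurs inside (s+s)[1:-1]); one linear scan instead of a scan per divisor.

-- ===== PORT A =====
-- for block_size in range(1, length): if length % block_size == 0 and length//block_size >= 2 and block*repeat == s: return True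
def is_invalid_repetition (str_num : String) : Bool :=
  let l := str_num.toList
  let length : Int := PySem.Chars.len l
  (PySem.List.pyRange 1 length 1).any fun block_size =>
    if PySem.Int.mod length block_size == 0 then
      let repeat_count := PySem.Int.floordiv length block_size
      if 2 ≤ repeat_count then
        PySem.List.pyRepeat (PySem.Chars.slice l none (some block_size)) repeat_count == l
      else false
    else false

-- ===== PORT B =====
-- return len(str_num) > 0 and str_num in (str_num + str_num)[1:-1]
def is_invalid_repetition_alt (str_num : String) : Bool :=
  let l := str_num.toList
  decide (0 < PySem.Chars.len l) && PySem.Chars.isIn l (PySem.Chars.slice (l ++ l) (some 1) (some (-1)))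

-- ===== PRECONDITION & SPEC =====
def Spec_is_invalid_repetition (str_num : String) (out : Bool) : Prop := out = is_invalid_repetition_alt str_num
instance (str_num : String) (out : Bool) : Decidable (Spec_is_invalid_repetition str_num out) := by unfold Spec_is_invalid_repetition; infer_instance

-- ===== CLAIM (what is proved, stated in full; the proofs are below) =====
def Claim_equal_is_invalid_repetition : Prop := ∀ (str_num : String), Dom_is_invalid_repetition str_num → Spec_is_invalid_repetition str_num (is_invalid_repetition str_num)

-- ===== LEMMAS AND PROOFS =====

-- A returns true iff some proper divisor block size d tiles the string.
theorem portA_iff (s : String) :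
    is_invalid_repetition s = true ↔
      ∃ d : ℕ, 1 ≤ d ∧ d < s.toList.length ∧ d ∣ s.toList.length ∧
        (List.replicate (s.toList.length / d) (s.toList.take d)).flatten = s.toList := by
  simp only [is_invalid_repetition, PySem.Chars.len_eq]
  rw [List.any_eq_true]
  constructor
  · rintro ⟨bs, hmem, hp⟩
    rw [PySem.List.mem_pyRange_one] at hmem
    obtain ⟨d, rfl⟩ : ∃ d : ℕ, bs = (d : Int) := ⟨bs.toNat, (Int.toNat_of_nonneg (by omega)).symm⟩
    have hd1 : 1 ≤ d := by exact_mod_cast hmem.1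
    have hdn : d < s.toList.length := by exact_mod_cast hmem.2
    simp only [pysem] at hp
    split_ifs at hp with h1 h2
    · have hm : s.toList.length % d = 0 := by exact_mod_cast beq_iff_eq.mp h1
      refine ⟨d, hd1, hdn, Nat.dvd_of_mod_eq_zero hm, ?_⟩
      simpa [PySem.List.pyRepeat] using hp
  · rintro ⟨d, hd1, hdn, hdvd, hflat⟩
    refine ⟨(d : Int), ?_, ?_⟩
    · rw [PySem.List.mem_pyRange_one]
      exact ⟨by exact_mod_cast hd1, by exact_mod_cast hdn⟩
    · have hmul : d * (s.toList.length / d) = s.toList.length := Nat.mul_div_cancel' hdvd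
      have h2 : 2 ≤ s.toList.length / d := by
        by_contra h
        have hle : s.toList.length / d ≤ 1 := by omega
        have : d * (s.toList.length / d) ≤ d * 1 := Nat.mul_le_mul_left d hle
        omega
      have hm0 : s.toList.length % d = 0 := Nat.mod_eq_zero_of_dvd hdvd
      simp only [pysem]
      rw [if_pos (beq_iff_eq.mpr (show (((s.toList.length % d : ℕ) : Int)) = 0 by exact_mod_cast hm0)),
        if_pos (show (2 : Int) ≤ (((s.toList.length / d : ℕ) : Int)) by exact_mod_cast h2)]
      simpa [PySem.List.pyRepeat] using hflat

-- the middle slice (l++l)[1:-1] concretely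
theorem slice_mid (l : List Char) (hn : 0 < l.length) :
    PySem.List.slice (l ++ l) (some 1) (some (-1)) =
      List.take (2 * l.length - 2) (List.drop 1 (l ++ l)) := by
  have hlen : (l ++ l).length = 2 * l.length := by simp; omega
  have h1 : PySem.List.clampIdx (l ++ l).length 1 = 1 := by
    simp [PySem.List.clampIdx, hlen]; omega
  have h2 : PySem.List.clampIdx (l ++ l).length (-1) = 2 * l.length - 1 := by
    simp only [PySem.List.clampIdx, hlen]
    split_ifs <;> omega
  simp only [PySem.List.slice, h1, h2,
    show 2 * l.length - 1 - 1 = 2 * l.length - 2 from by omega]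

theorem take_drop_double (l : List Char) (k : ℕ) (hk : k ≤ l.length) :
    List.take l.length (List.drop k (l ++ l)) = l.rotate k := by
  rw [List.drop_append_of_le_length hk, List.rotate_eq_drop_append_take hk]
  have hlen : l.length = (List.drop k l).length + k := by simp; omega
  rw [hlen, List.take_append]
  simp

-- B returns true iff l has a nontrivial rotation fixing it.
theorem portB_iff (s : String) :
    is_invalid_repetition_alt s = true ↔
      0 < s.toList.length ∧ ∃ k : ℕ, 1 ≤ k ∧ k < s.toList.length ∧ s.toList.rotate k = s.toList := by
  set l := s.toList with hl
  set n := l.length with hn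
  unfold is_invalid_repetition_alt
  rw [Bool.and_eq_true, decide_eq_true_iff]
  simp only [PySem.Chars.len_eq, ← hl, ← hn, Nat.cast_pos]
  constructor
  · rintro ⟨hpos, hin⟩
    refine ⟨hpos, ?_⟩
    rw [← PySem.Chars.exists_prefix_drop_iff_isIn] at hin
    obtain ⟨j, hpre⟩ := hin
    rw [PySem.Chars.slice_eq_listSlice, slice_mid l hpos] at hpre
    rw [List.drop_take, List.drop_drop] at hpre
    rw [List.prefix_take_iff] at hpre
    rw [Nat.add_comm 1 j] at hpre
    obtain ⟨hpre, hlen⟩ := hpre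
    have hj : j + 1 ≤ n - 1 := by omega
    refine ⟨j + 1, by omega, by omega, ?_⟩
    have := List.prefix_iff_eq_take.mp hpre
    rw [← take_drop_double l (j + 1) (by omega)]
    exact this.symm
  · rintro ⟨hpos, k, hk1, hkn, hrot⟩
    refine ⟨hpos, ?_⟩
    rw [← PySem.Chars.exists_prefix_drop_iff_isIn]
    refine ⟨k - 1, ?_⟩
    rw [PySem.Chars.slice_eq_listSlice, slice_mid l hpos]
    rw [List.drop_take, List.drop_drop]
    have hidx : 1 + (k - 1) = k := by omega
    rw [hidx]
    rw [List.prefix_take_iff]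
    constructor
    · rw [List.prefix_iff_eq_take]
      rw [take_drop_double l k (by omega), hrot]
    · omega

theorem rotate_mul_of_rotate (l : List Char) (k : ℕ) (h : l.rotate k = l) (t : ℕ) :
    l.rotate (t * k) = l := by
  induction t with
  | zero => simp
  | succ t ih =>
      have : (t + 1) * k = t * k + k := by ring
      rw [this, ← List.rotate_rotate, ih, h]

theorem rotate_gcd_of_rotate (l : List Char) (k : ℕ) (hk : 0 < k) (hkn : k < l.length)
    (h : l.rotate k = l) : l.rotate (Nat.gcd k l.length) = l := by
  set n := l.length with hn
  have hnpos : 0 < n := lt_of_le_of_lt (Nat.zero_le k) hkn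
  set g := Nat.gcd k n with hg
  set a := Nat.gcdA k n with ha
  set b := Nat.gcdB k n with hb
  have hbez : (g : ℤ) = (k : ℤ) * a + (n : ℤ) * b := Nat.gcd_eq_gcd_ab k n
  set t := ((a % (n : ℤ)).toNat) with htdef
  have hnne : (n : ℤ) ≠ 0 := by exact_mod_cast hnpos.ne'
  have htz : (t : ℤ) = a % (n : ℤ) := Int.toNat_of_nonneg (Int.emod_nonneg a hnne)
  have hmodeq : (t * k) % n = g % n := by
    have hz : ((t * k : ℕ) : ℤ) % (n : ℤ) = ((g : ℕ) : ℤ) % (n : ℤ) := by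
      push_cast
      rw [Int.mul_emod, htz, Int.emod_emod_of_dvd a dvd_rfl, ← Int.mul_emod]
      have hak : a * (k : ℤ) = (g : ℤ) - (n : ℤ) * b := by linarith [hbez]
      rw [hak, Int.sub_mul_emod_self_left]
    exact_mod_cast hz
  have hgk : g ≤ k := Nat.gcd_le_left n hk
  have hglt : g < n := lt_of_le_of_lt hgk hkn
  calc l.rotate g = l.rotate (g % n) := by rw [Nat.mod_eq_of_lt hglt]
    _ = l.rotate ((t * k) % n) := by rw [hmodeq]
    _ = l.rotate (t * k) := List.rotate_mod l (t * k)
    _ = l := rotate_mul_of_rotate l k h t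

theorem flatten_replicate_comm (b : List Char) (m : ℕ) :
    (List.replicate m b).flatten ++ b = b ++ (List.replicate m b).flatten := by
  induction m with
  | zero => simp
  | succ m ih => simp only [List.replicate_succ, List.flatten_cons, List.append_assoc, ih]

theorem flatten_of_rotate (g : ℕ) (_hg : 0 < g) :
    ∀ (m : ℕ) (l : List Char), l.length = m * g → l.rotate g = l →
      (List.replicate m (l.take g)).flatten = l := by
  intro m
  induction m with
  | zero =>
      intro l hlen _
      simp at hlen
      simp [hlen]
  | succ m ih =>
      intro l hlen hrot
      have hgle : g ≤ l.length := by
        rw [hlen, Nat.succ_mul]; omega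
      set bb := l.take g with hbdef
      set r := l.drop g with hrdef
      have hb : bb.length = g := by rw [hbdef, List.length_take]; omega
      have hr : r.length = m * g := by
        have hlr : r.length = l.length - g := by rw [hrdef, List.length_drop]
        rw [hlr, hlen, Nat.succ_mul, Nat.add_sub_cancel]
      have hbr : bb ++ r = l := List.take_append_drop g l
      have hrb : r ++ bb = l := by
        have := List.rotate_eq_drop_append_take hgle
        rw [this] at hrot
        exact hrot
      have hcomm : bb ++ r = r ++ bb := by rw [hbr, hrb]
      cases m with
      | zero =>
          have : r = [] := by simpa using hr
          simp only [this, List.append_nil] at hbr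
          simp [hbr]
      | succ m' =>
          have hgr : g ≤ r.length := by rw [hr, Nat.succ_mul]; omega
          have htake : r.take g = bb := by
            have h1 : List.take g (r ++ bb) = r.take g := List.take_append_of_le_length hgr
            have h2 : List.take g (bb ++ r) = bb := List.take_left' hb
            rw [← h1, ← hcomm, h2]
          have hdrop : r.drop g ++ bb = r := by
            have h1 : List.drop g (r ++ bb) = r.drop g ++ bb := List.drop_append_of_le_length hgr
            have h2 : List.drop g (bb ++ r) = r := List.drop_left' hb
            rw [← h1, ← hcomm, h2]
          have hrotr : r.rotate g = r := by
            rw [List.rotate_eq_drop_append_take hgr, htake, hdrop]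
          have hih := ih r hr hrotr
          rw [htake] at hih
          rw [List.replicate_succ, List.flatten_cons, hih, hbr]

theorem power_iff_rotate (l : List Char) (hn : 0 < l.length) :
    (∃ d : ℕ, 1 ≤ d ∧ d < l.length ∧ d ∣ l.length ∧
        (List.replicate (l.length / d) (l.take d)).flatten = l)
      ↔ (∃ k : ℕ, 1 ≤ k ∧ k < l.length ∧ l.rotate k = l) := by
  constructor
  · rintro ⟨d, hd1, hdn, hdvd, hflat⟩
    refine ⟨d, hd1, hdn, ?_⟩
    have hmul : d * (l.length / d) = l.length := Nat.mul_div_cancel' hdvd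
    have hdle : d ≤ l.length := le_of_lt hdn
    have hb : (l.take d).length = d := by rw [List.length_take]; omega
    obtain ⟨m', hm'⟩ : ∃ m', l.length / d = m' + 1 := by
      refine ⟨l.length / d - 1, ?_⟩
      rcases Nat.eq_zero_or_pos (l.length / d) with h | h
      · rw [h, Nat.mul_zero] at hmul; omega
      · omega
    rw [hm', List.replicate_succ, List.flatten_cons] at hflat
    rw [List.rotate_eq_drop_append_take hdle]
    have hdropl : l.drop d = (List.replicate m' (l.take d)).flatten := by
      have h3 := congrArg (List.drop d) hflat
      rw [List.drop_left' hb] at h3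
      exact h3.symm
    rw [hdropl, flatten_replicate_comm]
    exact hflat
  · rintro ⟨k, hk1, hkn, hrot⟩
    have hrotg : l.rotate (Nat.gcd k l.length) = l := rotate_gcd_of_rotate l k hk1 hkn hrot
    have hgpos : 0 < Nat.gcd k l.length := Nat.gcd_pos_of_pos_left l.length hk1
    have hgdvd : Nat.gcd k l.length ∣ l.length := Nat.gcd_dvd_right k l.length
    have hglt : Nat.gcd k l.length < l.length := lt_of_le_of_lt (Nat.gcd_le_left l.length hk1) hkn
    refine ⟨Nat.gcd k l.length, hgpos, hglt, hgdvd, ?_⟩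
    have hlen : l.length = (l.length / Nat.gcd k l.length) * Nat.gcd k l.length :=
      (Nat.div_mul_cancel hgdvd).symm
    exact flatten_of_rotate (Nat.gcd k l.length) hgpos (l.length / Nat.gcd k l.length) l hlen hrotg

-- ===== VERDICT (by name: the statement is the Claim_ definition above) =====
theorem is_invalid_repetition_spec : Claim_equal_is_invalid_repetition := by
  intro s _
  unfold Spec_is_invalid_repetition
  rw [Bool.eq_iff_iff, portA_iff, portB_iff]
  rcases Nat.eq_zero_or_pos s.toList.length with h0 | hpos
  · constructor
    · rintro ⟨d, _, hdn, _⟩; omega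
    · rintro ⟨h, _⟩; omega
  · rw [power_iff_rotate s.toList hpos]
    constructor
    · intro h; exact ⟨hpos, h⟩
    · rintro ⟨_, h⟩; exact h
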